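-- pv_equiv track=rewrite | github.com/amandilippandit/LatentSpec | src/latentspec/mining/statistical/sequence.py | _closed_patterns
-- ===== SOURCE A (Python) =====
-- def _closed_patterns(
--     patterns: dict[tuple[str, ...], int],
-- ) -> dict[tuple[str, ...], int]:
--     """A pattern P is *closed* iff no superpattern has the same support."""
--     closed: dict[tuple[str, ...], int] = {}
--     for pat, sup in patterns.items():
--         is_closed = True
--         for other, other_sup in patterns.items():
--             if pat == other or len(other) <= len(pat):
--                 continue
--             if other_sup != sup:
--                 continue
--             if _is_subsequence(pat, other):
--                 is_closed = False
--                 break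
--         if is_closed:
--             closed[pat] = sup
--     return closed
--
-- def _is_subsequence(a: tuple[str, ...], b: tuple[str, ...]) -> bool:
--     """Return True iff `a` is a (non-contiguous) subsequence of `b`."""
--     it = iter(b)
--     return all(item in it for item in a)
-- ===== SOURCE B (Python) =====
-- def _closed_patterns(
--     patterns: dict[tuple[str, ...], int],
-- ) -> dict[tuple[str, ...], int]:
--     """A pattern P is *closed* iff no superpattern has the same support."""
--     by_sup: dict[int, list[tuple[str, ...]]] = {}
--     for pat, sup in patterns.items():
--         by_sup.setdefault(sup, []).append(pat)
--     closed: dict[tuple[str, ...], int] = {}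
--     for pat, sup in patterns.items():
--         if not any(len(other) > len(pat) and _is_subsequence(pat, other)
--                    for other in by_sup[sup]):
--             closed[pat] = sup
--     return closed
--
-- def _is_subsequence(a: tuple[str, ...], b: tuple[str, ...]) -> bool:
--     """Greedy two-pointer subsequence test."""
--     i = 0
--     n = len(a)
--     for item in b:
--         if i < n and a[i] == item:
--             i += 1
--     return i == n
-- ===== Notes on version B (the rewrite author's own statement) =====
-- stated objective: alternative
-- what changed: B precomputes a support->patterns index in one pass so the closedness test scans only the same-support bucket (the equal-support branch and full-dict inner rescan disappear), and replaces the iterator-consuming subsequence test with a greedy two-pointer index loop.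
import Mathlib
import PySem

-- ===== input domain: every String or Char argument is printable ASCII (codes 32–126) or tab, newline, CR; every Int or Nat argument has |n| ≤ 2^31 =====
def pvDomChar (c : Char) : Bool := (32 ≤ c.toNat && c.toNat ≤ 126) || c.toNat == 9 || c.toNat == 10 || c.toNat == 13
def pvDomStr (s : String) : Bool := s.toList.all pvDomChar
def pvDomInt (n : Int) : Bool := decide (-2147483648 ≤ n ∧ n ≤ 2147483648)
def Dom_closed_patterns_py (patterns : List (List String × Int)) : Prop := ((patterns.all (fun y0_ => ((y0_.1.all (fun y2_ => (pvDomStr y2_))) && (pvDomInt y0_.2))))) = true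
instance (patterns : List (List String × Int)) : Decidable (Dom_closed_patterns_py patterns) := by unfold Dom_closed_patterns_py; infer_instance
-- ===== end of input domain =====

-- B groups patterns into buckets by support once, so the closedness test scans only same-support
-- patterns (with a two-pointer subsequence test) instead of re-scanning the whole dict; objective: alternative.


-- ===== PORT A =====
-- `item in it` on an iterator: consume until the item is found, returning the rest; none = not found.
def pvInIter (x : String) : List String → Option (List String)
  | [] => none
  | y :: ys => if y = x then some ys else pvInIter x ys

-- _is_subsequence(a, b): all(item in it for item in a) over it = iter(b)
def pvIsSubseqA : List String → List String → Bool
  | [], _ => true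
  | x :: xs, b =>
    match pvInIter x b with
    | none => false
    | some rest => pvIsSubseqA xs rest

-- the inner `for other, other_sup in patterns.items()` loop with its break
def pvInnerA (pat : List String) (sup : Int) : List (List String × Int) → Bool
  | [] => true
  | (other, otherSup) :: rest =>
    if pat = other ∨ other.length ≤ pat.length then pvInnerA pat sup rest
    else if otherSup ≠ sup then pvInnerA pat sup rest
    else if pvIsSubseqA pat other then false
    else pvInnerA pat sup rest

def closed_patterns_py (patterns : List (List String × Int)) : List (List String × Int) :=
  (patterns.foldl
    (fun (closed : PySem.Dict (List String) Int) p =>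
      if pvInnerA p.1 p.2 patterns then closed.insert p.1 p.2 else closed)
    PySem.Dict.empty).items

-- ===== PORT B =====
-- _is_subsequence(a, b): greedy two-pointer loop over b with index i into a
def pvIsSubseqB (a b : List String) : Bool :=
  (b.foldl
    (fun (i : Nat) item =>
      if h : i < a.length then (if a[i] = item then i + 1 else i) else i)
    0) == a.length

-- the support index: one pass building support ↦ [patterns with that support]
def pvBySup (patterns : List (List String × Int)) : PySem.Dict Int (List (List String)) :=
  patterns.foldl (fun d p => d.modify p.2 [] (· ++ [p.1])) PySem.Dict.empty

def closed_patterns_py_alt (patterns : List (List String × Int)) : List (List String × Int) :=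
  (patterns.foldl
    (fun (closed : PySem.Dict (List String) Int) p =>
      if ((pvBySup patterns).getD p.2 []).any
          (fun other => decide (p.1.length < other.length) && pvIsSubseqB p.1 other)
      then closed
      else closed.insert p.1 p.2)
    PySem.Dict.empty).items

-- ===== PRECONDITION & SPEC =====
def Spec_closed_patterns_py (patterns : List (List String × Int)) (out : List (List String × Int)) : Prop := out = closed_patterns_py_alt patterns
instance (patterns : List (List String × Int)) (out : List (List String × Int)) : Decidable (Spec_closed_patterns_py patterns out) := by unfold Spec_closed_patterns_py; infer_instance

-- ===== CLAIM (what is proved, stated in full; the proofs are below) =====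
def Claim_equal_closed_patterns_py : Prop := ∀ (patterns : List (List String × Int)), Dom_closed_patterns_py patterns → Spec_closed_patterns_py patterns (closed_patterns_py patterns)

-- ===== LEMMAS AND PROOFS =====

-- the standard structural subsequence test, common reference point for both ports
def pvSubseq : List String → List String → Bool
  | [], _ => true
  | _ :: _, [] => false
  | x :: xs, y :: ys => if y = x then pvSubseq xs ys else pvSubseq (x :: xs) ys

theorem pvIsSubseqA_eq (a b : List String) : pvIsSubseqA a b = pvSubseq a b := by
  induction b generalizing a with
  | nil => cases a <;> simp [pvIsSubseqA, pvSubseq, pvInIter]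
  | cons y ys ih =>
    cases a with
    | nil => simp [pvIsSubseqA, pvSubseq]
    | cons x xs =>
      by_cases h : y = x
      · simp [pvIsSubseqA, pvSubseq, pvInIter, h, ← ih]
      · have : pvIsSubseqA (x :: xs) (y :: ys) = pvIsSubseqA (x :: xs) ys := by
          simp [pvIsSubseqA, pvInIter, h]
        rw [this, ih, pvSubseq]
        simp [h]

theorem pvIsSubseqB_fold (a : List String) (b : List String) (i : Nat) (hi : i ≤ a.length) :
    ((b.foldl
      (fun (j : Nat) item =>
        if h : j < a.length then (if a[j] = item then j + 1 else j) else j)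
      i) == a.length) = pvSubseq (a.drop i) b := by
  induction b generalizing i with
  | nil =>
    simp only [List.foldl_nil]
    rcases Nat.lt_or_ge i a.length with h | h
    · have hne : ¬ (i = a.length) := by omega
      have hdrop : a.drop i ≠ [] := by
        simp [List.drop_eq_nil_iff]; omega
      cases hd : a.drop i with
      | nil => exact absurd hd hdrop
      | cons z zs => simp [pvSubseq, hne]
    · have : i = a.length := le_antisymm hi h
      subst this
      simp [pvSubseq, List.drop_length]
  | cons y ys ih =>
    simp only [List.foldl_cons]
    by_cases h : i < a.length
    · have hdrop : a.drop i = a[i] :: a.drop (i + 1) := (List.getElem_cons_drop h).symm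
      by_cases he : a[i] = y
      · rw [dif_pos h, if_pos he, ih _ (by omega), hdrop, pvSubseq]
        simp [he]
      · have hy : ¬ (y = a[i]) := fun hc => he hc.symm
        rw [dif_pos h, if_neg he, ih _ hi, hdrop, pvSubseq, if_neg hy]
    · have : i = a.length := by omega
      subst this
      rw [dif_neg h, ih _ hi]
      simp [List.drop_length, pvSubseq]

theorem pvIsSubseqB_eq (a b : List String) : pvIsSubseqB a b = pvSubseq a b := by
  have := pvIsSubseqB_fold a b 0 (Nat.zero_le _)
  simpa [pvIsSubseqB] using this

-- characterisation of A's inner loop: true iff no strictly longer same-support superpattern exists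
theorem pvInnerA_eq_not_any (pat : List String) (sup : Int) (l : List (List String × Int)) :
    pvInnerA pat sup l
      = ! l.any (fun q => decide (pat.length < q.1.length) && (q.2 == sup) && pvSubseq pat q.1) := by
  induction l with
  | nil => simp [pvInnerA]
  | cons p rest ih =>
    obtain ⟨other, otherSup⟩ := p
    simp only [pvInnerA, List.any_cons]
    split_ifs with h1 h2 h3
    · have hlen : ¬ pat.length < other.length := by
        rcases h1 with h | h
        · subst h; omega
        · omega
      simp [ih, hlen]
    · simp [ih, h2]
    · rw [not_or] at h1
      have hlt : pat.length < other.length := lt_of_not_ge h1.2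
      have hs : otherSup = sup := not_ne_iff.mp h2
      rw [pvIsSubseqA_eq] at h3
      simp [hlt, hs, h3]
    · rw [pvIsSubseqA_eq] at h3
      have h3' : pvSubseq pat other = false := by
        revert h3; cases pvSubseq pat other <;> simp
      simp [ih, h3']

-- the grouping pass: the bucket for support s collects, in order, the patterns whose support is s
theorem pvBySup_getD (l : List (List String × Int)) (d : PySem.Dict Int (List (List String))) (s : Int) :
    (l.foldl (fun d p => d.modify p.2 [] (· ++ [p.1])) d).getD s []
      = d.getD s [] ++ (l.filter (fun p => p.2 == s)).map (·.1) := by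
  induction l generalizing d with
  | nil => simp
  | cons p rest ih =>
    simp only [List.foldl_cons, ih, List.filter_cons]
    by_cases h : p.2 = s
    · subst h
      rw [PySem.Dict.getD_modify_self]
      simp
    · rw [PySem.Dict.getD_modify, if_neg (fun hc => h hc.symm)]
      simp [h]

-- per-entry agreement of the two closedness decisions
theorem pvStep_agree (patterns : List (List String × Int)) (p : List String × Int) :
    pvInnerA p.1 p.2 patterns
      = ! ((pvBySup patterns).getD p.2 []).any
            (fun other => decide (p.1.length < other.length) && pvIsSubseqB p.1 other) := by
  rw [pvInnerA_eq_not_any]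
  unfold pvBySup
  rw [pvBySup_getD]
  simp only [PySem.Dict.getD_empty, List.nil_append, List.any_map, List.any_filter]
  congr 1
  apply List.any_congr
  all_goals try rfl
  all_goals intros
  all_goals simp [pvIsSubseqB_eq, Function.comp, Bool.and_comm, Bool.and_left_comm]

-- ===== VERDICT (by name: the statement is the Claim_ definition above) =====
theorem closed_patterns_py_spec : Claim_equal_closed_patterns_py := by
  intro patterns _
  unfold Spec_closed_patterns_py closed_patterns_py closed_patterns_py_alt
  congr 1
  apply List.foldl_ext
  intro acc p hp
  rw [pvStep_agree patterns p]
  split_ifs with h1 h2 <;> first | rfl | (exfalso; simp_all)
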